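-- pv_equiv track=rewrite | github.com/SeongSuKim95/Solved_Problems | 프로그래머스/lv1/12930. 이상한 문자 만들기/이상한 문자 만들기.py | solution
-- ===== SOURCE A (Python) =====
-- def solution(s):
--     answer = ''
--     word_list = s.split(' ')
--
--     for word in word_list:
--         word = word.lower()
--         temp = ''
--         for idx,alpha in enumerate(word):
--             if idx % 2 == 0 :
--                 temp += alpha.upper()
--             else:
--                 temp += alpha
--         answer += temp + ' '
--     return answer[:-1]
-- ===== SOURCE B (Python) =====
-- def solution(s):
--     out = []
--     k = 0
--     for c in s:
--         if c == ' ':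
--             out.append(' ')
--             k = 0
--         else:
--             out.append(c.upper() if k % 2 == 0 else c.lower())
--             k += 1
--     return ''.join(out)
-- ===== Notes on version B (the rewrite author's own statement) =====
-- stated objective: simpler
-- what changed: Replaces the split-on-space / per-word enumerate / lowercase-then-recase / trailing-space-trim pipeline by a single pass over the string with an integer counter that resets at each space, casing each character directly and never producing a trailing space.
import Mathlib
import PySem

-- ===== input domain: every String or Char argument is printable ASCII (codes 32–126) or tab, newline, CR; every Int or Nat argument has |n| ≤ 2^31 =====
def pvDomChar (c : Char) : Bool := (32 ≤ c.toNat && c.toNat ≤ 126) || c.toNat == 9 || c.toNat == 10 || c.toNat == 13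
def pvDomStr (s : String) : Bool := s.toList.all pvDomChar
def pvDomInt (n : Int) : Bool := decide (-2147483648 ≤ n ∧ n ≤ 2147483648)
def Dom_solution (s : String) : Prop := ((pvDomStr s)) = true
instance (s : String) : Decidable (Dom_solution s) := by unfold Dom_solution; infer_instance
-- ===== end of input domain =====

-- B replaces A's split(' ')/enumerate/per-word rebuild/trailing-space trim by one pass with a counter
-- that resets on spaces; the return values agree on all inputs (objective: simpler).

-- ===== PORT A =====
def solution (s : String) : String :=
  let wordList := PySem.Chars.splitOn s.toList [' ']
  let answer : List Char := wordList.foldl (fun answer word =>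
    let word := PySem.Chars.lower word
    let temp : List Char := (PySem.List.enumerate word).foldl
      (fun temp p =>
        if PySem.Int.mod p.1 2 == 0 then temp ++ [PySem.Chars.upperChar p.2]
        else temp ++ [p.2]) []
    answer ++ (temp ++ [' '])) []
  String.ofList (PySem.List.slice answer none (some (-1)))

-- ===== PORT B =====
def solution_alt (s : String) : String :=
  let st := s.toList.foldl (fun (st : List Char × Nat) c =>
    if c == ' ' then (st.1 ++ [' '], 0)
    else (st.1 ++ [if st.2 % 2 == 0 then PySem.Chars.upperChar c else PySem.Chars.lowerChar c],
          st.2 + 1)) ([], 0)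
  String.ofList st.1

-- ===== PRECONDITION & SPEC =====
def Spec_solution (s : String) (out : String) : Prop := out = solution_alt s
instance (s : String) (out : String) : Decidable (Spec_solution s out) := by unfold Spec_solution; infer_instance

-- ===== CLAIM (what is proved, stated in full; the proofs are below) =====
def Claim_equal_solution : Prop := ∀ (s : String), Dom_solution s → Spec_solution s (solution s)

-- ===== LEMMAS AND PROOFS =====

theorem char_le_iff (a b : Char) : a ≤ b ↔ a.toNat ≤ b.toNat := by
  rw [Char.le_def]; rfl

theorem toNat_ofNat' (n : Nat) (h : n < 55296) : (Char.ofNat n).toNat = n := by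
  rw [Char.toNat_ofNat, if_pos]; exact Or.inl h

theorem upper_lower (c : Char) :
    PySem.Chars.upperChar (PySem.Chars.lowerChar c) = PySem.Chars.upperChar c := by
  simp only [PySem.Chars.upperChar, PySem.Chars.lowerChar, PySem.Chars.islower, PySem.Chars.isupper]
  by_cases hu : (decide ('A' ≤ c) && decide (c ≤ 'Z')) = true
  · have h1 : 65 ≤ c.toNat := by
      simp only [Bool.and_eq_true, decide_eq_true_eq] at hu
      exact (char_le_iff _ _).mp hu.1
    have h2 : c.toNat ≤ 90 := by
      simp only [Bool.and_eq_true, decide_eq_true_eq] at hu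
      exact (char_le_iff _ _).mp hu.2
    have hv : (Char.ofNat (c.toNat + 32)).toNat = c.toNat + 32 := toNat_ofNat' _ (by omega)
    have hlow : (decide ('a' ≤ Char.ofNat (c.toNat + 32)) && decide (Char.ofNat (c.toNat + 32) ≤ 'z')) = true := by
      simp only [Bool.and_eq_true, decide_eq_true_eq, char_le_iff, hv]
      constructor <;> [show (97:Nat) ≤ _; show _ ≤ (122:Nat)] <;> omega
    have hnl : (decide ('a' ≤ c) && decide (c ≤ 'z')) = false := by
      simp only [Bool.and_eq_false_iff, decide_eq_false_iff_not, char_le_iff]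
      left; show ¬ (97:Nat) ≤ _; omega
    have h32 : c.toNat + 32 - 32 = c.toNat := by omega
    simp [hu, hlow, hnl, hv, h32, Char.ofNat_toNat]
  · simp only [Bool.not_eq_true] at hu
    simp [hu]

def splitAux : List Char → List Char → List (List Char)
  | pre, [] => [pre]
  | pre, c :: r => if c = ' ' then pre :: splitAux [] r else splitAux (pre ++ [c]) r

theorem go_eq (fuel : Nat) (l cur : List Char) (acc : List (List Char)) (h : l.length < fuel) :
    PySem.Chars.splitOn.go [' '] fuel l cur acc = acc.reverse ++ splitAux cur.reverse l := by
  induction fuel generalizing l cur acc with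
  | zero => omega
  | succ n ih =>
    cases l with
    | nil => simp [PySem.Chars.splitOn.go, splitAux]
    | cons c rest =>
      rw [PySem.Chars.splitOn.go]
      by_cases hc : c = ' '
      · subst hc
        have hp : [' '].isPrefixOf (' ' :: rest) = true := by simp [List.isPrefixOf]
        simp only [hp, if_true, List.length_cons] at *
        rw [show List.drop ([].length + 1) (' ' :: rest) = rest from rfl]
        rw [ih rest [] ((cur.reverse) :: acc) (by simpa using Nat.lt_of_succ_lt_succ h)]
        simp [splitAux]
      · have hp : [' '].isPrefixOf (c :: rest) = false := by
          simp [List.isPrefixOf]; exact fun h' => hc h'.symm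
        simp only [hp, Bool.false_eq_true, if_false]
        rw [ih rest (c :: cur) acc (by simpa using Nat.lt_of_succ_lt_succ h)]
        simp [splitAux, hc]

def fA : Nat → List Char → List Char
  | _, [] => []
  | k, c :: r => (if k % 2 = 0 then PySem.Chars.upperChar c else c) :: fA (k + 1) r

theorem enum_fold (w : List Char) (t : List Char) (k : Nat) :
    (PySem.List.enumerate w (k : Int)).foldl
      (fun temp p =>
        if PySem.Int.mod p.1 2 == 0 then temp ++ [PySem.Chars.upperChar p.2]
        else temp ++ [p.2]) t = t ++ fA k w := by
  induction w generalizing t k with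
  | nil => simp [PySem.List.enumerate, fA]
  | cons c r ih =>
    rw [PySem.List.enumerate_cons]
    simp only [List.foldl_cons]
    have hcast : ((k : Int) + 1) = ((k + 1 : Nat) : Int) := by push_cast; ring
    rw [hcast, ih]
    have hmod : (PySem.Int.mod (k : Int) 2 == 0) = (k % 2 == 0) := by
      simp only [PySem.Int.mod]
      rcases Nat.even_or_odd k with he | ho
      · obtain ⟨m, hm⟩ := he
        have : ((k : Int)).fmod 2 = 0 := by
          rw [Int.fmod_eq_emod]; omega
        simp [this]; omega
      · obtain ⟨m, hm⟩ := ho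
        have : ((k : Int)).fmod 2 = 1 := by
          rw [Int.fmod_eq_emod]; omega
        simp [this]; omega
    rw [hmod]
    by_cases hk : k % 2 = 0 <;> simp [hk, fA]

def gWord (w : List Char) : List Char := fA 0 (PySem.Chars.lower w)

def hB : List Char → Nat → List Char
  | [], _ => []
  | c :: r, k =>
    if c = ' ' then ' ' :: hB r 0
    else (if k % 2 = 0 then PySem.Chars.upperChar c else PySem.Chars.lowerChar c) :: hB r (k + 1)

theorem fA_append (xs : List Char) (k : Nat) (c : Char) :
    fA k (xs ++ [c]) = fA k xs ++
      [if (k + xs.length) % 2 = 0 then PySem.Chars.upperChar c else c] := by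
  induction xs generalizing k with
  | nil => simp [fA]
  | cons x r ih =>
    simp only [List.cons_append, fA, ih, List.length_cons]
    have : k + 1 + r.length = k + (r.length + 1) := by omega
    rw [this]
    rfl

theorem gWord_snoc (pre : List Char) (c : Char) :
    gWord (pre ++ [c]) = gWord pre ++
      [if pre.length % 2 = 0 then PySem.Chars.upperChar (PySem.Chars.lowerChar c)
       else PySem.Chars.lowerChar c] := by
  unfold gWord
  have : PySem.Chars.lower (pre ++ [c]) = PySem.Chars.lower pre ++ [PySem.Chars.lowerChar c] := by
    simp [PySem.Chars.lower]
  rw [this, fA_append]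
  simp [PySem.Chars.lower]

theorem main_fold (s : List Char) (pre ans : List Char) :
    (splitAux pre s).foldl (fun a w => a ++ (gWord w ++ [' '])) ans
      = ans ++ gWord pre ++ hB s pre.length ++ [' '] := by
  induction s generalizing pre ans with
  | nil => simp [splitAux, hB]
  | cons c r ih =>
    by_cases hc : c = ' '
    · subst hc
      rw [show splitAux pre (' ' :: r) = pre :: splitAux [] r by simp [splitAux]]
      rw [show hB (' ' :: r) pre.length = ' ' :: hB r 0 by simp [hB]]
      simp only [List.foldl_cons]
      rw [ih [] (ans ++ (gWord pre ++ [' ']))]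
      simp [gWord, PySem.Chars.lower, fA]
    · simp only [splitAux, hc, if_false, hB]
      rw [ih (pre ++ [c]) ans, gWord_snoc]
      simp only [List.length_append, List.length_cons, List.length_nil]
      by_cases hk : pre.length % 2 = 0 <;>
        simp [hk, upper_lower, List.append_assoc]

theorem b_fold (s : List Char) (out : List Char) (k : Nat) :
    (s.foldl (fun (st : List Char × Nat) c =>
      if c == ' ' then (st.1 ++ [' '], 0)
      else (st.1 ++ [if st.2 % 2 == 0 then PySem.Chars.upperChar c else PySem.Chars.lowerChar c],
            st.2 + 1)) (out, k)).1 = out ++ hB s k := by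
  induction s generalizing out k with
  | nil => simp [hB]
  | cons c r ih =>
    by_cases hc : c = ' '
    · subst hc
      simp only [List.foldl_cons, beq_self_eq_true, if_true]
      rw [ih, show hB (' ' :: r) k = ' ' :: hB r 0 by simp [hB]]
      simp
    · have hb : (c == ' ') = false := by simp [hc]
      simp only [List.foldl_cons, hb, Bool.false_eq_true, if_false]
      rw [ih]
      have : hB (c :: r) k = (if k % 2 = 0 then PySem.Chars.upperChar c else PySem.Chars.lowerChar c) :: hB r (k+1) := by
        simp [hB, hc]
      rw [this]
      by_cases hk : k % 2 = 0 <;> simp [hk]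


theorem splitOn_space (s : List Char) : PySem.Chars.splitOn s [' '] = splitAux [] s := by
  unfold PySem.Chars.splitOn
  simpa using go_eq (s.length + 1) s [] [] (by omega)

theorem final (s : String) : solution s = solution_alt s := by
  unfold solution solution_alt
  simp only []
  have hstep : (fun (answer word : List Char) => answer ++
      ((PySem.List.enumerate (PySem.Chars.lower word)).foldl
        (fun temp p =>
          if PySem.Int.mod p.1 2 == 0 then temp ++ [PySem.Chars.upperChar p.2]
          else temp ++ [p.2]) [] ++ [' ']))
      = fun a w => a ++ (gWord w ++ [' ']) := by
    funext a w
    have h0 := enum_fold (PySem.Chars.lower w) [] 0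
    simp only [Nat.cast_zero] at h0
    rw [h0]
    simp [gWord]
  rw [hstep, splitOn_space, main_fold, b_fold]
  have hg : gWord [] = [] := rfl
  rw [hg]
  simp only [List.nil_append, List.length_nil]
  rw [PySem.List.slice_to_neg_one]
  rw [List.dropLast_concat]

-- ===== VERDICT (by name: the statement is the Claim_ definition above) =====
theorem solution_spec : Claim_equal_solution := by
  intro s _
  unfold Spec_solution
  exact final s
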